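-- pv_equiv track=rewrite | github.com/thecodercody/dsa | problems/p08_unique_segments/solution.py | unique_segments
-- ===== SOURCE A (Python) =====
-- from collections import defaultdict
--
-- def unique_segments(intervals):
--     events = defaultdict(int)
--
--     # build events
--     for s, e in intervals:
--         events[s] += 1
--         events[e + 1] -= 1   # +1 because intervals are inclusive
--
--     # sweep
--     active = 0
--     prev = None
--     result = []
--
--     for x in sorted(events):
--         if prev is not None and active == 1:
--             result.append([prev, x - 1])
--
--         active += events[x]
--         prev = x
--
--     return result
-- ===== SOURCE B (Python) =====
-- def unique_segments(intervals):
--     starts = [s for s, e in intervals]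
--     ends = [e + 1 for s, e in intervals]
--     coords = sorted({*starts, *ends})
--     return [[prev, x - 1]
--             for prev, x in zip(coords, coords[1:])
--             if sum(c <= prev for c in starts) - sum(c <= prev for c in ends) == 1]
-- ===== Notes on version B (the rewrite author's own statement) =====
-- stated objective: simpler
-- what changed: Replaces the defaultdict of deltas and the running-accumulator sweep by directly counting, for each gap between consecutive distinct coordinates, how many intervals cover it (starts before vs ends before), emitting the gap when the coverage is exactly 1.
import Mathlib
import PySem

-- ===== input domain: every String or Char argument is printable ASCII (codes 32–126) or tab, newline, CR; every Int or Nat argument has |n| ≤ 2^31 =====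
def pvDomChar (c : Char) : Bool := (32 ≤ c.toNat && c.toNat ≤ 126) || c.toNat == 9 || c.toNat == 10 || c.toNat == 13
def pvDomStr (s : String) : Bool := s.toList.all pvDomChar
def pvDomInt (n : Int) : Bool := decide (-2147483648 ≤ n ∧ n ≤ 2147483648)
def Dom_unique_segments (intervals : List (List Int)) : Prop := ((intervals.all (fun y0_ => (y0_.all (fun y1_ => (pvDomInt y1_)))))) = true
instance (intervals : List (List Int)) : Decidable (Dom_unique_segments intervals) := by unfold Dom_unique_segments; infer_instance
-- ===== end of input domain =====

-- B replaces A's delta-dict and running accumulator by per-gap coverage counting (simpler, not faster).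

-- ===== PORT A =====
-- A's event-building loop: events[s] += 1; events[e + 1] -= 1 over a defaultdict(int)
def pvEventsA (intervals : List (List Int)) : PySem.Dict Int Int :=
  intervals.foldl (fun d iv =>
    match iv with
    | [s, e] => (d.modify s 0 (· + 1)).modify (e + 1) 0 (· - 1)
    | _ => d) PySem.Dict.empty   -- a row that is not a pair raises ValueError in Python; outside Pre_

-- one iteration of A's sweep loop over the state (active, prev, result)
def pvStepA (events : PySem.Dict Int Int) (st : Int × Option Int × List (List Int)) (x : Int) :
    Int × Option Int × List (List Int) :=
  let res := match st.2.1 with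
    | some p => if st.1 == 1 then st.2.2 ++ [[p, x - 1]] else st.2.2
    | none => st.2.2
  (st.1 + events.getD x 0, some x, res)

def unique_segments (intervals : List (List Int)) : List (List Int) :=
  ((PySem.List.sorted (pvEventsA intervals).keys (fun k => k)).foldl
    (pvStepA (pvEventsA intervals))
    ((0 : Int), (none : Option Int), ([] : List (List Int)))).2.2

-- ===== PORT B =====
-- Source B's 'starts = [s for s, e in intervals]' (unpacking raises outside Pre_)
def pvStarts (intervals : List (List Int)) : List Int :=
  intervals.map (fun iv => match iv with | [s, _] => s | _ => 0)
-- Source B's 'ends = [e + 1 for s, e in intervals]'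
def pvEnds (intervals : List (List Int)) : List Int :=
  intervals.map (fun iv => match iv with | [_, e] => e + 1 | _ => 0)

-- literal port of Source B: sorted set of coordinates, then for each adjacent coordinate
-- pair count coverage by two boolean sums and keep the pairs covered exactly once.
def unique_segments_alt (intervals : List (List Int)) : List (List Int) :=
  let starts := pvStarts intervals
  let ends := pvEnds intervals
  let coords := PySem.List.sorted (PySem.Set.ofList (starts ++ ends)) (fun x => x)
  ((coords.zip (coords.drop 1)).filter
      (fun pr => ((starts.map (fun c => if c ≤ pr.1 then (1 : Int) else 0)).sum
                 - (ends.map (fun c => if c ≤ pr.1 then (1 : Int) else 0)).sum) == 1)).map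
    (fun pr => [pr.1, pr.2 - 1])

-- ===== PRECONDITION & SPEC =====
-- Pre_: every row is a 2-element list; on any other row Python's 'for s, e in intervals' raises ValueError.
def Pre_unique_segments (intervals : List (List Int)) : Prop :=
  (intervals.all (fun iv => iv.length == 2)) = true
instance (intervals : List (List Int)) : Decidable (Pre_unique_segments intervals) := by
  unfold Pre_unique_segments; infer_instance
def pvWitness_unique_segments : List (List Int) := [[0, 2], [1, 4]]
def Spec_unique_segments (intervals : List (List Int)) (out : List (List Int)) : Prop := out = unique_segments_alt intervals
instance (intervals : List (List Int)) (out : List (List Int)) : Decidable (Spec_unique_segments intervals out) := by unfold Spec_unique_segments; infer_instance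

-- ===== CLAIM (what is proved, stated in full; the proofs are below) =====
def Claim_equal_unique_segments : Prop := ∀ (intervals : List (List Int)), Dom_unique_segments intervals → Pre_unique_segments intervals → Spec_unique_segments intervals (unique_segments intervals)

-- ===== LEMMAS AND PROOFS =====

-- coverage of the unit region just right of p
def pvCnt (starts ends : List Int) (p : Int) : Int :=
  (starts.countP (fun c => c ≤ p) : Int) - (ends.countP (fun c => c ≤ p) : Int)
-- net delta of A's event dict at x
def pvEv (starts ends : List Int) (x : Int) : Int :=
  (starts.count x : Int) - (ends.count x : Int)
-- A's event-building fold, flattened to (coordinate, delta) pairs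
def pvFlat (intervals : List (List Int)) : List (Int × Int) :=
  intervals.flatMap (fun iv => match iv with | [s, e] => [(s, 1), (e + 1, -1)] | _ => [])

theorem pvPre_cons {iv : List Int} {rest : List (List Int)}
    (h : Pre_unique_segments (iv :: rest)) :
    iv.length = 2 ∧ Pre_unique_segments rest := by
  simp only [Pre_unique_segments, List.all_cons, Bool.and_eq_true, beq_iff_eq] at h ⊢
  exact h

theorem pvBuild_eq_flat (intervals : List (List Int)) (d : PySem.Dict Int Int) :
    intervals.foldl (fun d iv =>
      match iv with
      | [s, e] => (d.modify s 0 (· + 1)).modify (e + 1) 0 (· - 1)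
      | _ => d) d
    = (pvFlat intervals).foldl (fun d p => d.modify p.1 0 (· + p.2)) d := by
  induction intervals generalizing d with
  | nil => rfl
  | cons iv rest ih =>
    match iv with
    | [] => simpa [pvFlat] using ih d
    | [s] => simpa [pvFlat] using ih _
    | [s, e] =>
      simp only [pvFlat, List.flatMap_cons, List.foldl_append, List.foldl_cons, List.foldl_nil]
      rw [ih]; rfl
    | s :: e :: c :: t => simpa [pvFlat] using ih _

theorem pvGetD_flat_fold (l : List (Int × Int)) (d : PySem.Dict Int Int) (x : Int) :
    (l.foldl (fun d p => PySem.Dict.modify d p.1 0 (· + p.2)) d).getD x 0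
    = d.getD x 0 + ((l.filter (fun p => p.1 == x)).map (·.2)).sum := by
  induction l generalizing d with
  | nil => simp
  | cons p t ih =>
    simp only [List.foldl_cons, ih, PySem.Dict.getD_modify, List.filter_cons]
    by_cases h : x = p.1
    · simp [← h]; ring
    · rw [if_neg (fun hh : (p.1 == x) = true => h (beq_iff_eq.mp hh).symm), if_neg h]

theorem pvFlat_filter_sum (intervals : List (List Int)) (x : Int)
    (hpre : Pre_unique_segments intervals) :
    (((pvFlat intervals).filter (fun p => p.1 == x)).map (·.2)).sum
    = pvEv (pvStarts intervals) (pvEnds intervals) x := by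
  induction intervals with
  | nil => simp [pvFlat, pvEv, pvStarts, pvEnds]
  | cons iv rest ih =>
    obtain ⟨hiv, hpre'⟩ := pvPre_cons hpre
    match iv, hiv with
    | [s, e], _ =>
      have := ih hpre'
      simp only [pvFlat, List.flatMap_cons, List.filter_append, List.map_append, List.sum_append,
        pvStarts, pvEnds, pvEv, List.map_cons, List.count_cons] at this ⊢
      by_cases hs : s = x <;> by_cases he : e + 1 = x <;>
        simp [hs, he] <;> omega

theorem pvFlat_keys_mem (intervals : List (List Int)) (x : Int)
    (hpre : Pre_unique_segments intervals) :
    x ∈ (pvFlat intervals).map (·.1) ↔ x ∈ pvStarts intervals ++ pvEnds intervals := by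
  induction intervals with
  | nil => simp [pvFlat, pvStarts, pvEnds]
  | cons iv rest ih =>
    obtain ⟨hiv, hpre'⟩ := pvPre_cons hpre
    match iv, hiv with
    | [s, e], _ =>
      have := ih hpre'
      simp only [pvFlat, pvStarts, pvEnds, List.flatMap_cons, List.map_append, List.map_cons,
        List.mem_append, List.mem_cons] at this ⊢
      tauto

theorem pvEvents_getD (intervals : List (List Int)) (x : Int)
    (hpre : Pre_unique_segments intervals) :
    (pvEventsA intervals).getD x 0 = pvEv (pvStarts intervals) (pvEnds intervals) x := by
  unfold pvEventsA
  rw [pvBuild_eq_flat, pvGetD_flat_fold, pvFlat_filter_sum intervals x hpre]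
  simp

theorem pvCoords_eq (intervals : List (List Int)) (hpre : Pre_unique_segments intervals) :
    PySem.List.sorted (pvEventsA intervals).keys (fun k => k)
    = PySem.List.sorted (PySem.Set.ofList (pvStarts intervals ++ pvEnds intervals)) (fun k => k) := by
  unfold pvEventsA
  rw [pvBuild_eq_flat]
  rw [PySem.Dict.keys_foldl_modify_key (pvFlat intervals) (·.1) 0 (fun _ p v => v + p.2) PySem.Dict.empty]
  have hk : PySem.Set.update (PySem.Dict.empty : PySem.Dict Int Int).keys ((pvFlat intervals).map (·.1))
      = PySem.Set.ofList ((pvFlat intervals).map (·.1)) := rfl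
  rw [hk]
  apply PySem.List.sorted_eq_sorted_of_perm _ _ _ (fun a b h => h)
  rw [List.perm_ext_iff_of_nodup (PySem.Set.nodup_ofList _) (PySem.Set.nodup_ofList _)]
  intro x
  rw [PySem.Set.mem_ofList, PySem.Set.mem_ofList]
  exact pvFlat_keys_mem intervals x hpre

theorem pvCountP_le_split (l : List Int) (p x : Int) (hpx : p < x)
    (h : ∀ c ∈ l, ¬ (p < c ∧ c < x)) :
    l.countP (fun c => c ≤ x) = l.countP (fun c => c ≤ p) + l.count x := by
  induction l with
  | nil => simp
  | cons c t ih =>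
    have hc : ¬ (p < c ∧ c < x) := h c (by simp)
    have ht : ∀ c ∈ t, ¬ (p < c ∧ c < x) := fun c hcmem => h c (by simp [hcmem])
    simp only [List.countP_cons, List.count_cons, ih ht, decide_eq_true_eq, beq_iff_eq]
    split_ifs <;> omega

theorem pvCnt_step (starts ends : List Int) (p x : Int) (hpx : p < x)
    (h : ∀ c ∈ starts ++ ends, ¬ (p < c ∧ c < x)) :
    pvCnt starts ends x = pvCnt starts ends p + pvEv starts ends x := by
  have hs := pvCountP_le_split starts p x hpx (fun c hc => h c (List.mem_append_left _ hc))
  have he := pvCountP_le_split ends p x hpx (fun c hc => h c (List.mem_append_right _ hc))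
  simp only [pvCnt, pvEv, hs, he]; push_cast; ring

theorem pvCnt_head (starts ends : List Int) (k : Int)
    (h : ∀ c ∈ starts ++ ends, k ≤ c) :
    pvCnt starts ends k = pvEv starts ends k := by
  have hs : starts.countP (fun c => c ≤ k) = starts.count k := by
    rw [List.count_eq_countP]
    refine List.countP_congr (fun c hc => ?_)
    have := h c (List.mem_append_left _ hc)
    simp only [decide_eq_true_eq, beq_iff_eq]
    omega
  have he : ends.countP (fun c => c ≤ k) = ends.count k := by
    rw [List.count_eq_countP]
    refine List.countP_congr (fun c hc => ?_)
    have := h c (List.mem_append_right _ hc)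
    simp only [decide_eq_true_eq, beq_iff_eq]
    omega
  simp [pvCnt, pvEv, hs, he]

-- Prop-valued ite variant of PySem.List.sum_map_ite_one_zero (B sums 'c <= prev' booleans)
theorem pvSumIte (xs : List Int) (p : Int) :
    (xs.map (fun c => if c ≤ p then (1 : Int) else 0)).sum = (xs.countP (fun c => c ≤ p) : Int) := by
  induction xs with
  | nil => simp
  | cons c t ih =>
    simp only [List.map_cons, List.sum_cons, List.countP_cons, ih, decide_eq_true_eq]
    split_ifs <;> push_cast <;> ring

-- the sweep invariant: starting at prev = p with active = coverage left of the gap,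
-- A's remaining fold produces exactly B's filtered adjacent pairs
theorem pvSweep (starts ends : List Int) (events : PySem.Dict Int Int)
    (hf : ∀ x, events.getD x 0 = pvEv starts ends x)
    (xs : List Int) (p a : Int) (r : List (List Int))
    (ha : a = pvCnt starts ends p)
    (hcov : ∀ c ∈ starts ++ ends, c ≤ p ∨ c ∈ xs)
    (hsort : (p :: xs).Pairwise (· < ·)) :
    (xs.foldl (pvStepA events) (a, some p, r)).2.2
    = r ++ (((p :: xs).zip xs).filter (fun pr => pvCnt starts ends pr.1 == 1)).map
        (fun pr => [pr.1, pr.2 - 1]) := by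
  induction xs generalizing p a r with
  | nil => simp
  | cons x xs ih =>
    have hpx : p < x := (List.pairwise_cons.mp hsort).1 x (by simp)
    have hxxs : ∀ c ∈ xs, x < c := (List.pairwise_cons.mp (List.pairwise_cons.mp hsort).2).1
    have hsort' : (x :: xs).Pairwise (· < ·) := (List.pairwise_cons.mp hsort).2
    have hno : ∀ c ∈ starts ++ ends, ¬ (p < c ∧ c < x) := by
      intro c hc hcontra
      obtain ⟨h1, h2⟩ := hcontra
      rcases hcov c hc with h | h
      · omega
      · rcases List.mem_cons.mp h with rfl | h
        · omega
        · exact absurd (hxxs c h) (by omega)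
    have hcov' : ∀ c ∈ starts ++ ends, c ≤ x ∨ c ∈ xs := by
      intro c hc
      rcases hcov c hc with h | h
      · left; omega
      · rcases List.mem_cons.mp h with rfl | h
        · left; omega
        · right; exact h
    have ha' : a + events.getD x 0 = pvCnt starts ends x := by
      rw [hf, ha, ← pvCnt_step starts ends p x hpx hno]
    have step : pvStepA events (a, some p, r) x
        = (a + events.getD x 0, some x, if a == 1 then r ++ [[p, x - 1]] else r) := rfl
    rw [List.foldl_cons, step, ih x (a + events.getD x 0) _ ha' hcov' hsort']
    simp only [List.zip_cons_cons, List.filter_cons, ha]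
    by_cases h1 : (pvCnt starts ends p == 1) = true <;> simp [h1, List.append_assoc]

-- B's output, with the boolean sums rewritten to the coverage count pvCnt
theorem pvAltB (intervals : List (List Int)) :
    unique_segments_alt intervals
    = ((PySem.List.sorted (PySem.Set.ofList (pvStarts intervals ++ pvEnds intervals)) (fun k => k)).zip
        ((PySem.List.sorted (PySem.Set.ofList (pvStarts intervals ++ pvEnds intervals)) (fun k => k)).drop 1)
      |>.filter (fun pr => pvCnt (pvStarts intervals) (pvEnds intervals) pr.1 == 1)
      |>.map (fun pr => [pr.1, pr.2 - 1])) := by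
  simp only [unique_segments_alt]
  have hpred : (fun pr : Int × Int =>
      (((pvStarts intervals).map (fun c => if c ≤ pr.1 then (1 : Int) else 0)).sum
        - ((pvEnds intervals).map (fun c => if c ≤ pr.1 then (1 : Int) else 0)).sum) == 1)
      = (fun pr : Int × Int => pvCnt (pvStarts intervals) (pvEnds intervals) pr.1 == 1) := by
    funext pr
    rw [pvSumIte, pvSumIte]
    rfl
  rw [hpred]

-- ===== VERDICT (by name: the statement is the Claim_ definition above) =====
theorem unique_segments_spec : Claim_equal_unique_segments := by
  intro intervals _ hpre
  unfold Spec_unique_segments unique_segments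
  rw [pvAltB, pvCoords_eq intervals hpre]
  set starts := pvStarts intervals with hstarts
  set ends := pvEnds intervals with hends
  have hf : ∀ x, (pvEventsA intervals).getD x 0 = pvEv starts ends x :=
    fun x => pvEvents_getD intervals x hpre
  have hsorted : (PySem.List.sorted (PySem.Set.ofList (starts ++ ends)) (fun k => k)).Pairwise (· < ·) :=
    PySem.List.sorted_ofList_pairwise_lt _
  have hmem : ∀ c ∈ starts ++ ends,
      c ∈ PySem.List.sorted (PySem.Set.ofList (starts ++ ends)) (fun k => k) := by
    intro c hc
    rw [PySem.List.mem_sorted, PySem.Set.mem_ofList]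
    exact hc
  match hc : PySem.List.sorted (PySem.Set.ofList (starts ++ ends)) (fun k => k) with
  | [] => simp
  | k0 :: rest =>
    rw [hc] at hsorted hmem
    have hmin : ∀ c ∈ starts ++ ends, k0 ≤ c := fun c hcm =>
      PySem.List.key_head_sorted_le (PySem.Set.ofList (starts ++ ends)) (fun k => k) hc c
        (by rw [PySem.Set.mem_ofList]; exact hcm)
    have step0 : pvStepA (pvEventsA intervals) ((0 : Int), (none : Option Int), ([] : List (List Int))) k0
        = (0 + (pvEventsA intervals).getD k0 0, some k0, ([] : List (List Int))) := rfl
    have ha : 0 + (pvEventsA intervals).getD k0 0 = pvCnt starts ends k0 := by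
      rw [hf, pvCnt_head starts ends k0 hmin]; ring
    have hcov : ∀ c ∈ starts ++ ends, c ≤ k0 ∨ c ∈ rest := by
      intro c hcm
      rcases List.mem_cons.mp (hmem c hcm) with rfl | h
      · left; exact le_refl _
      · right; exact h
    rw [List.foldl_cons, step0,
      pvSweep starts ends (pvEventsA intervals) hf rest k0 _ [] ha hcov hsorted]
    simp
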